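-- pv_equiv track=rewrite | github.com/B0897/Feature-Face-Detection | model/network/data_prepare.py | group_age33
-- ===== SOURCE A (Python) =====
-- def group_age33(labels):
--     class_labels = []
--     for age in labels:
--         if age < 26:
--             class_labels.append(0)
--         elif 26 <= age < 37:
--             class_labels.append(1)
--         elif 37 <= age:
--             class_labels.append(2)
--     return class_labels
-- ===== SOURCE B (Python) =====
-- import bisect
--
-- _BOUNDS = [26, 37]
--
-- def group_age33(labels):
--     return [bisect.bisect_right(_BOUNDS, age) for age in labels]
-- ===== Notes on version B (the rewrite author's own statement) =====
-- stated objective: idiomatic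
-- what changed: Replaces the chained if/elif appends with a comprehension that assigns each age its bucket via bisect_right on a sorted cutoffs table [26, 37].
import Mathlib
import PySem

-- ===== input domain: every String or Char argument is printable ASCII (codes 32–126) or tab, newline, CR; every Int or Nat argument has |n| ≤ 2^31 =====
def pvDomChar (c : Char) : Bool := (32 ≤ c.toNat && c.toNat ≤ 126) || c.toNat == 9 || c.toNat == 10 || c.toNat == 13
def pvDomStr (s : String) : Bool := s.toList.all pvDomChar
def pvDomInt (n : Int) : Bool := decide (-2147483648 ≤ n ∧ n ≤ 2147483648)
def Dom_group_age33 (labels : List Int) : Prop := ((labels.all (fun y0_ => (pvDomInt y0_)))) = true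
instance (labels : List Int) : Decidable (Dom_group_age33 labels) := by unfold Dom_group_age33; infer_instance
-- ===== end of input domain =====

-- B replaces the chained if/elif appends with a per-element bucket lookup in the
-- sorted cutoffs table [26, 37] (bisect_right), collected by a comprehension. (idiomatic)

-- ===== PORT A =====
-- literal transliteration of A: loop over labels, appending 0/1/2 by the chained tests
def group_age33 (labels : List Int) : List Int :=
  labels.foldl (fun class_labels age =>
    if age < 26 then class_labels ++ [0]
    else if 26 ≤ age ∧ age < 37 then class_labels ++ [1]
    else if 37 ≤ age then class_labels ++ [2]
    else class_labels) []

-- ===== PORT B =====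
-- bisect.bisect_right on the sorted table [26, 37]: the insertion point = number of
-- bounds ≤ age (library call ported by its mathematical contract on this sorted list)
def pvBisectRight (bounds : List Int) (x : Int) : Int :=
  (bounds.filter (fun b => b ≤ x)).length

def group_age33_alt (labels : List Int) : List Int :=
  labels.map (fun age => pvBisectRight [26, 37] age)

-- ===== PRECONDITION & SPEC =====
def Spec_group_age33 (labels : List Int) (out : List Int) : Prop := out = group_age33_alt labels
instance (labels : List Int) (out : List Int) : Decidable (Spec_group_age33 labels out) := by unfold Spec_group_age33; infer_instance

-- ===== CLAIM (what is proved, stated in full; the proofs are below) =====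
def Claim_equal_group_age33 : Prop := ∀ (labels : List Int), Dom_group_age33 labels → Spec_group_age33 labels (group_age33 labels)

-- ===== LEMMAS AND PROOFS =====
def pvBucket (age : Int) : Int :=
  if age < 26 then 0 else if 26 ≤ age ∧ age < 37 then 1 else if 37 ≤ age then 2 else 0

theorem pvBucket_eq_bisect (age : Int) : pvBucket age = pvBisectRight [26, 37] age := by
  unfold pvBucket pvBisectRight
  by_cases h1 : 26 ≤ age <;> by_cases h2 : 37 ≤ age <;>
    simp [List.filter, h1, h2] <;> omega

theorem group_age33_foldl (labels : List Int) (acc : List Int) :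
    labels.foldl (fun class_labels age =>
      if age < 26 then class_labels ++ [0]
      else if 26 ≤ age ∧ age < 37 then class_labels ++ [1]
      else if 37 ≤ age then class_labels ++ [2]
      else class_labels) acc = acc ++ labels.map pvBucket := by
  induction labels generalizing acc with
  | nil => simp
  | cons a t ih =>
    simp only [List.foldl_cons, List.map_cons, ih]
    unfold pvBucket
    split_ifs with h1 h2 h3 <;> simp <;> omega

-- ===== VERDICT (by name: the statement is the Claim_ definition above) =====
theorem group_age33_spec : Claim_equal_group_age33 := by
  intro labels _
  unfold Spec_group_age33 group_age33 group_age33_alt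
  rw [group_age33_foldl]
  simp [pvBucket_eq_bisect]
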